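-- pv_equiv track=rewrite | github.com/prk7048/Hogak_Stitching | stitching/domain/runtime/service/metrics.py | _command_line_token
-- ===== SOURCE A (Python) =====
-- from typing import Any
--
-- def _command_line_token(command_line: Any, key: str) -> str:
--     text = str(command_line or "").strip()
--     key_text = str(key or "").strip()
--     if not text or not key_text:
--         return ""
--     key_prefix = f"{key_text}="
--     for part in text.split():
--         if part.startswith(key_prefix):
--             return part[len(key_prefix) :].strip()
--     return ""
-- ===== SOURCE B (Python) =====
-- def _command_line_token(command_line, key):
--     text = str(command_line or "").strip()
--     key_text = str(key or "").strip()
--     if not text or not key_text: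
--         return ""
--     table = {}
--     for part in text.split():
--         i = part.find("=")
--         if i >= 0 and part[:i] not in table:
--             table[part[:i]] = part[i + 1:].strip()
--     return table.get(key_text, "")
-- ===== Notes on version B (the rewrite author's own statement) =====
-- stated objective: alternative
-- what changed: B parses the whole command line once into a first-occurrence-wins key->value table (splitting each token at its first '=') and answers with a single dict lookup, instead of A's scan for the first token carrying the 'key=' prefix.
-- outside the precondition, e.g. on _command_line_token('a=b=c x=1', 'a=b'): A returns 'c', B returns ''
import Mathlib
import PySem

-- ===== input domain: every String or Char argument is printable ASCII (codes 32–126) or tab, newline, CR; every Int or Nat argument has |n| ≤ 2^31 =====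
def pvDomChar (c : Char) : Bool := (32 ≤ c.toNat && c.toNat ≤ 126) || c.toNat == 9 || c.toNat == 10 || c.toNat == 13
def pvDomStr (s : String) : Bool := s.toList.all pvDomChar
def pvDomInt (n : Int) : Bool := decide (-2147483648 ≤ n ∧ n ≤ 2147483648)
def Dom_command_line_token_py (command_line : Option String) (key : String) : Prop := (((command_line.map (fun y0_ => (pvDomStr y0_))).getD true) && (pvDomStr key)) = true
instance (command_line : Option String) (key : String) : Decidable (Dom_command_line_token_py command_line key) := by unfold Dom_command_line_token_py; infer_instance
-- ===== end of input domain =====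

-- B replaces A's first-matching-prefix scan by building a first-occurrence-wins key→value
-- table from all tokens once and answering with a single lookup (alternative decomposition).

-- ===== PORT A =====
def pvALoop (parts : List String) (key_prefix : String) : String :=
  match parts with
  | [] => ""
  | p :: rest =>
    if PySem.Str.startswith p key_prefix then
      PySem.Str.strip (PySem.Str.slice p (some (PySem.Str.len key_prefix)) none)
    else pvALoop rest key_prefix

def command_line_token_py (command_line : Option String) (key : String) : String :=
  let text := PySem.Str.strip (command_line.getD "")
  let key_text := PySem.Str.strip key
  if text = "" ∨ key_text = "" then ""
  else
    let key_prefix := key_text ++ "="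
    pvALoop (PySem.Str.split₀ text) key_prefix

-- ===== PORT B =====
def pvBStep (d : PySem.Dict String String) (part : String) : PySem.Dict String String :=
  let i := PySem.Str.find part "="
  if 0 ≤ i ∧ d.contains (PySem.Str.slice part none (some i)) = false then
    d.insert (PySem.Str.slice part none (some i))
      (PySem.Str.strip (PySem.Str.slice part (some (i + 1)) none))
  else d

def command_line_token_py_alt (command_line : Option String) (key : String) : String :=
  let text := PySem.Str.strip (command_line.getD "")
  let key_text := PySem.Str.strip key
  if text = "" ∨ key_text = "" then ""
  else
    ((PySem.Str.split₀ text).foldl pvBStep PySem.Dict.empty).getD key_text ""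

-- ===== PRECONDITION & SPEC =====
-- Pre_ excludes keys that still contain '=' after stripping: on such degenerate keys A's
-- prefix scan can match across several '='-separated segments of a token while B's
-- key→value table (keyed by the part before the first '=') cannot; neither behaviour is
-- specified for a key containing the separator.
def Pre_command_line_token_py (command_line : Option String) (key : String) : Prop :=
  PySem.Str.isIn "=" (PySem.Str.strip key) = false

instance (command_line : Option String) (key : String) : Decidable (Pre_command_line_token_py command_line key) := by unfold Pre_command_line_token_py; infer_instance

def pvWitness_command_line_token_py : Option String × String := (some "a=1 b=2", "b")

def Spec_command_line_token_py (command_line : Option String) (key : String) (out : String) : Prop := out = command_line_token_py_alt command_line key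
instance (command_line : Option String) (key : String) (out : String) : Decidable (Spec_command_line_token_py command_line key out) := by unfold Spec_command_line_token_py; infer_instance

-- ===== CLAIM (what is proved, stated in full; the proofs are below) =====
def Claim_equal_command_line_token_py : Prop := ∀ (command_line : Option String) (key : String), Dom_command_line_token_py command_line key → Pre_command_line_token_py command_line key → Spec_command_line_token_py command_line key (command_line_token_py command_line key)

-- ===== LEMMAS AND PROOFS =====

-- a singleton list is a prefix iff it is the head
theorem pv_singleton_prefix_iff (c : Char) (xs : List Char) : [c] <+: xs ↔ xs.head? = some c := by
  cases xs with
  | nil => simp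
  | cons x t => simp [List.cons_prefix_cons, eq_comm]

-- a singleton list is an infix iff its element occurs
theorem pv_singleton_infix_iff (c : Char) (l : List Char) : [c] <:+: l ↔ c ∈ l := by
  constructor
  · intro ⟨s, t, hst⟩; subst hst; simp
  · intro hm
    obtain ⟨s, t, rfl⟩ := List.mem_iff_append.1 hm
    exact ⟨s, t, by simp⟩

-- the first '=' of kl ++ '=' :: t is at position kl.length when kl has no '='
theorem pv_find_eq (kl t : List Char) (hk : '=' ∉ kl) :
    PySem.Chars.find (kl ++ '=' :: t) ['='] = (kl.length : Int) := by
  set l := kl ++ '=' :: t with hl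
  have hinf : ['='] <:+: l := ⟨kl, t, by simp [hl]⟩
  have h0 : 0 ≤ PySem.Chars.find l ['='] := (PySem.Chars.find_nonneg_iff l ['=']).2 hinf
  obtain ⟨hpre, hmin⟩ := PySem.Chars.find_spec h0
  set n := (PySem.Chars.find l ['=']).toNat with hn
  have hle : n ≤ kl.length := by
    by_contra h
    push Not at h
    exact hmin kl.length h (by simp [hl])
  have hge : kl.length ≤ n := by
    by_contra h
    push Not at h
    have hh := (pv_singleton_prefix_iff '=' (l.drop n)).1 hpre
    have hdrop : l.drop n = kl.drop n ++ '=' :: t := by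
      simp [hl, List.drop_append_of_le_length (le_of_lt h)]
    rw [hdrop] at hh
    have hne : kl.drop n ≠ [] := by simp [h]
    rw [List.head?_append_of_ne_nil] at hh <;> try exact hne
    exact hk (List.mem_of_mem_drop (List.mem_of_mem_head? hh))
  have : n = kl.length := le_antisymm hle hge
  omega

-- if find points at position n, the string decomposes as take n ++ '=' :: drop (n+1)
theorem pv_find_decomp (l : List Char) (h0 : 0 ≤ PySem.Chars.find l ['=']) :
    l = l.take (PySem.Chars.find l ['=']).toNat ++
        '=' :: l.drop ((PySem.Chars.find l ['=']).toNat + 1) := by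
  obtain ⟨hpre, -⟩ := PySem.Chars.find_spec h0
  set n := (PySem.Chars.find l ['=']).toNat
  have hh := (pv_singleton_prefix_iff '=' (l.drop n)).1 hpre
  cases hd : l.drop n with
  | nil => rw [hd] at hh; simp at hh
  | cons x r =>
    rw [hd] at hh
    simp at hh
    subst hh
    have hr : r = l.drop (n + 1) := by
      have := congrArg List.tail hd
      simpa [List.tail_drop] using this.symm
    rw [← hr, ← hd, List.take_append_drop]

-- a token that starts with k ++ "=" has its first '=' at k's length, and its head segment is k
theorem pv_match_true (p k : String) (hk : '=' ∉ k.toList)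
    (hp : PySem.Str.startswith p (k ++ "=") = true) :
    PySem.Str.find p "=" = (k.toList.length : Int) ∧
      PySem.Str.slice p none (some (PySem.Str.find p "=")) = k := by
  have hpre : (k.toList ++ ['=']) <+: p.toList := by
    simpa [PySem.Chars.startswith_iff] using hp
  obtain ⟨u, hu⟩ := hpre
  have hl : p.toList = k.toList ++ '=' :: u := by
    rw [← hu]; simp
  have hfind : PySem.Str.find p "=" = (k.toList.length : Int) := by
    simp [hl, pv_find_eq _ _ hk]
  have h0' : (0 : Int) ≤ PySem.Chars.find p.toList ['='] := by
    have : PySem.Chars.find p.toList ['='] = (k.toList.length : Int) := by simpa using hfind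
    rw [this]; positivity
  refine ⟨hfind, ?_⟩
  apply String.toList_injective
  have hts : (PySem.Str.slice p none (some (PySem.Str.find p "="))).toList =
      p.toList.take (PySem.Str.find p "=").toNat := by
    simpa using PySem.List.slice_to p.toList h0'
  rw [hts, hfind, hl]
  simp

-- a token that does NOT start with k ++ "=" never contributes the key k
theorem pv_match_false (p k : String)
    (hp : PySem.Str.startswith p (k ++ "=") = false)
    (h0 : 0 ≤ PySem.Str.find p "=") :
    PySem.Str.slice p none (some (PySem.Str.find p "=")) ≠ k := by
  intro he
  have hfind0 : 0 ≤ PySem.Chars.find p.toList ['='] := by simpa using h0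
  have hts : (PySem.Str.slice p none (some (PySem.Str.find p "="))).toList =
      p.toList.take (PySem.Str.find p "=").toNat := by
    simpa using PySem.List.slice_to p.toList hfind0
  have hd := pv_find_decomp p.toList hfind0
  have htake : p.toList.take (PySem.Chars.find p.toList ['=']).toNat = k.toList := by
    have hc := congrArg String.toList he
    rw [hts] at hc
    simpa using hc
  rw [htake] at hd
  have hsw : PySem.Str.startswith p (k ++ "=") = true := by
    simp only [PySem.Str.startswith_eq]
    rw [PySem.Chars.startswith_iff]
    refine ⟨p.toList.drop ((PySem.Chars.find p.toList ['=']).toNat + 1), ?_⟩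
    simp [← hd]
  rw [hsw] at hp; cases hp

-- unfolds pvBStep's let-binding (definitional)
theorem pvBStep_eq (d : PySem.Dict String String) (p : String) :
    pvBStep d p =
      if 0 ≤ PySem.Str.find p "=" ∧
          d.contains (PySem.Str.slice p none (some (PySem.Str.find p "="))) = false then
        d.insert (PySem.Str.slice p none (some (PySem.Str.find p "=")))
          (PySem.Str.strip (PySem.Str.slice p (some (PySem.Str.find p "=" + 1)) none))
      else d := rfl

-- a step never changes an existing binding
theorem pv_step_keep (d : PySem.Dict String String) (p k v : String)
    (h : d.get? k = some v) : (pvBStep d p).get? k = some v := by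
  rw [pvBStep_eq]
  split
  · rename_i hc
    have hne : k ≠ PySem.Str.slice p none (some (PySem.Str.find p "=")) := by
      intro he
      rw [← he] at hc
      rw [(PySem.Dict.get?_eq_none_iff_contains d k).2 hc.2] at h
      cases h
    rw [PySem.Dict.get?_insert_of_ne d _ hne]
    exact h
  · exact h

theorem pv_foldl_keep (ws : List String) (d : PySem.Dict String String) (k v : String)
    (h : d.get? k = some v) : (ws.foldl pvBStep d).get? k = some v := by
  induction ws generalizing d with
  | nil => simpa using h
  | cons p rest ih => exact ih _ (pv_step_keep d p k v h)

-- main loop equivalence: A's prefix scan = B's table build + lookup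
theorem pv_loop_eq (ws : List String) (k : String) (hk : '=' ∉ k.toList)
    (d : PySem.Dict String String) (hd : d.get? k = none) :
    (ws.foldl pvBStep d).getD k "" = pvALoop ws (k ++ "=") := by
  induction ws generalizing d with
  | nil => simp [pvALoop, PySem.Dict.getD_eq_get?_getD, hd]
  | cons p rest ih =>
    simp only [List.foldl_cons, pvALoop]
    by_cases hp : PySem.Str.startswith p (k ++ "=") = true
    · rw [if_pos hp]
      obtain ⟨hfind, hslice⟩ := pv_match_true p k hk hp
      have hstep : pvBStep d p = d.insert k
          (PySem.Str.strip (PySem.Str.slice p (some (PySem.Str.find p "=" + 1)) none)) := by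
        rw [pvBStep_eq, if_pos, hslice]
        refine ⟨by rw [hfind]; positivity, ?_⟩
        rw [hslice]
        exact (PySem.Dict.get?_eq_none_iff_contains d k).1 hd
      rw [hstep]
      have hkeep := pv_foldl_keep rest (d.insert k
          (PySem.Str.strip (PySem.Str.slice p (some (PySem.Str.find p "=" + 1)) none))) k _
          (PySem.Dict.get?_insert_self d k _)
      rw [PySem.Dict.getD_eq_get?_getD, hkeep]
      have hcf : PySem.Chars.find p.toList ['='] = (k.length : Int) := by
        simpa using hfind
      simp [hcf]
    · rw [if_neg hp]
      rw [Bool.not_eq_true] at hp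
      apply ih
      rw [pvBStep_eq]
      split
      · rename_i hc
        have hne : k ≠ PySem.Str.slice p none (some (PySem.Str.find p "=")) :=
          fun he => pv_match_false p k hp hc.1 he.symm
        rw [PySem.Dict.get?_insert_of_ne d _ hne]
        exact hd
      · exact hd

-- Pre_ gives '=' not in the stripped key
theorem pv_pre_mem (key : String) (h : PySem.Str.isIn "=" (PySem.Str.strip key) = false) :
    '=' ∉ (PySem.Str.strip key).toList := by
  intro hm
  have ht : PySem.Str.isIn "=" (PySem.Str.strip key) = true := by
    rw [PySem.Str.isIn_iff_infix]
    simpa [pv_singleton_infix_iff] using hm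
  rw [ht] at h; cases h

-- ===== VERDICT (by name: the statement is the Claim_ definition above) =====
theorem command_line_token_py_spec : Claim_equal_command_line_token_py := by
  intro command_line key _ hpre
  show command_line_token_py command_line key = command_line_token_py_alt command_line key
  show (if PySem.Str.strip (command_line.getD "") = "" ∨ PySem.Str.strip key = "" then ""
      else pvALoop (PySem.Str.split₀ (PySem.Str.strip (command_line.getD "")))
        (PySem.Str.strip key ++ "=")) =
    (if PySem.Str.strip (command_line.getD "") = "" ∨ PySem.Str.strip key = "" then ""
      else ((PySem.Str.split₀ (PySem.Str.strip (command_line.getD ""))).foldl pvBStep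
        PySem.Dict.empty).getD (PySem.Str.strip key) "")
  split
  · rfl
  · exact (pv_loop_eq _ _ (pv_pre_mem key hpre) PySem.Dict.empty (by simp)).symm
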